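-- pv_equiv track=rewrite | github.com/datarocksAmy/MontePython | Program Assignments #4 - Transposition.py | untranspose
-- ===== SOURCE A (Python) =====
-- def untranspose(line):
--      """ Take a transpose message & return it back to the original """
--      import math
--      untranspose_outcome = ""
--      iterate = 0
--      j = 0
--      i = math.ceil(len(line)/2)
--      while iterate <= len(line):
--         if j in range(0,i):
--             if i in range(i,len(line)):
--                 untranspose_outcome += line[j]+line[i]
--                 i+=1
--                 j+=1
--
--         iterate +=1
--      if len(line)%2 != 0:
--          untranspose_outcome += line[j]
--
--
--      return untranspose_outcome
-- ===== SOURCE B (Python) =====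
-- def untranspose(line):
--     """Take a transposed message & return it back to the original."""
--     n = len(line)
--     h = (n + 1) // 2
--     out = [''] * n
--     for idx, c in enumerate(line):
--         out[2 * idx if idx < h else 2 * (idx - h) + 1] = c
--     return ''.join(out)
-- ===== Notes on version B (the rewrite author's own statement) =====
-- stated objective: faster
-- what changed: Replaced A's two-pointer gather loop (shared counters j,i with range-membership guards, building the result by repeated string +=) with an inverse-permutation scatter: a single pass over the input that writes each character directly into a preallocated output buffer at its computed original position (2*idx for the first half, 2*(idx-h)+1 for the second), then one join of the buffer.
import Mathlib
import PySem

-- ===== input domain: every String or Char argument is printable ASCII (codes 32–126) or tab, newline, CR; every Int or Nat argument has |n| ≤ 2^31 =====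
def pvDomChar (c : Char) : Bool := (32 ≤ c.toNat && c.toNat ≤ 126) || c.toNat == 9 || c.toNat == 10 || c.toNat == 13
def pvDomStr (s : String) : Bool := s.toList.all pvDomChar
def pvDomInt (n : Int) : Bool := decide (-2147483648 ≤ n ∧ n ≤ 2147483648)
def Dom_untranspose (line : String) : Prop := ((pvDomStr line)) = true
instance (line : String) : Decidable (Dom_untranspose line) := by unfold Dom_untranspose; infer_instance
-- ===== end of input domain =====

-- B replaces A's two-pointer gather loop (shared counters, range-membership guards, string +=)
-- by an inverse-permutation scatter: one pass over the input writing each character into a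
-- preallocated buffer at its computed original position, joined once (objective: faster, measured).


-- ===== PORT A =====
-- Body of A's while-loop (one iteration; 'iterate' only counts, so the loop runs len+1 times).
-- The .getD ' ' defaults are never reached: both indexings are guarded in range, so A never raises.
def untransposeStep (cs : List Char) (n : Int) (st : List Char × Int × Int) :
    List Char × Int × Int :=
  match st with
  | (out, j, i) =>
    if 0 ≤ j ∧ j < i then                -- 'j in range(0, i)'
      if i ≤ i ∧ i < n then              -- 'i in range(i, len(line))'
        (out ++ [(PySem.List.pyGet? cs j).getD ' ', (PySem.List.pyGet? cs i).getD ' '],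
         j + 1, i + 1)
      else (out, j, i)
    else (out, j, i)

def untranspose (line : String) : String :=
  let cs := line.toList
  let n : Int := cs.length
  let i0 : Int := -(PySem.Int.floordiv (-n) 2)   -- math.ceil(len(line)/2) (exact: ceil = -((-n)//2))
  -- 'while iterate <= len(line)': iterate goes 0,1,…,len(line) — exactly len+1 iterations
  let st := (PySem.List.pyRange 0 (n + 1) 1).foldl
              (fun st _ => untransposeStep cs n st) (([] : List Char), (0 : Int), i0)
  let fin := if PySem.Int.mod n 2 ≠ 0
             then st.1 ++ [(PySem.List.pyGet? cs st.2.1).getD ' ']   -- 'line[j]'; always in range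
             else st.1
  String.mk fin

-- ===== PORT B =====
-- Loop body of Source B: out[2*idx if idx < h else 2*(idx-h)+1] = c.  A cell holds '' (= []) or a
-- one-character string (= [c]); ''.join is List.flatten.  The computed position is provably in
-- [0, n), where Python's list assignment succeeds, so .toNat and List.set are exact here.
def scatterStep (h : Int) (out : List (List Char)) (p : Int × Char) : List (List Char) :=
  out.set (if p.1 < h then 2 * p.1 else 2 * (p.1 - h) + 1).toNat [p.2]

def untranspose_alt (line : String) : String :=
  let cs := line.toList
  let n : Int := cs.length
  let h : Int := PySem.Int.floordiv (n + 1) 2          -- h = (n + 1) // 2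
  let out0 : List (List Char) := List.replicate cs.length []     -- out = [''] * n
  let out := (PySem.List.enumerate cs 0).foldl (scatterStep h) out0
  String.mk out.flatten                                 -- ''.join(out)

-- ===== PRECONDITION & SPEC =====
def Spec_untranspose (line : String) (out : String) : Prop := out = untranspose_alt line
instance (line : String) (out : String) : Decidable (Spec_untranspose line out) := by unfold Spec_untranspose; infer_instance

-- ===== CLAIM (what is proved, stated in full; the proofs are below) =====
def Claim_equal_untranspose : Prop := ∀ (line : String), Dom_untranspose line → Spec_untranspose line (untranspose line)

-- ===== LEMMAS AND PROOFS =====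

-- The common target: the de-interleaving of cs, as the zip of its two halves plus the odd middle.
def zipI (cs : List Char) : List Char :=
  (((cs.take ((cs.length + 1) / 2)).zip (cs.drop ((cs.length + 1) / 2))).flatMap
      fun p => [p.1, p.2]) ++
  (if cs.length % 2 ≠ 0 then [cs.getD (cs.length - (cs.length + 1) / 2) ' '] else [])

-- The output position of input index i, and its inverse (Nat forms used by the proofs).
def posIdx (h i : Nat) : Nat := if i < h then 2 * i else 2 * (i - h) + 1
def invIdx (h k : Nat) : Nat := if k % 2 = 0 then k / 2 else h + k / 2

lemma posIdx_lt (n h i : Nat) (hh : h = (n + 1) / 2) (_hi : i < n) : posIdx h i < n := by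
  unfold posIdx; split_ifs <;> omega

lemma invIdx_lt (n h k : Nat) (hh : h = (n + 1) / 2) (hk : k < n) : invIdx h k < n := by
  unfold invIdx; split_ifs <;> omega

lemma posIdx_invIdx (n h k : Nat) (hh : h = (n + 1) / 2) (hk : k < n) :
    posIdx h (invIdx h k) = k := by
  unfold posIdx invIdx; split_ifs <;> omega

lemma invIdx_posIdx (n h i : Nat) (hh : h = (n + 1) / 2) (hi : i < n) :
    invIdx h (posIdx h i) = i := by
  unfold posIdx invIdx; split_ifs <;> omega

lemma pos_cast (h j : Nat) :
    (if ((j : Nat) : Int) < (h : Int) then 2 * ((j : Nat) : Int)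
     else 2 * (((j : Nat) : Int) - (h : Int)) + 1).toNat = posIdx h j := by
  unfold posIdx; split_ifs <;> omega

-- Scatter invariant: folding the writes for indices j, j+1, …, n-1 over any buffer of length n
-- sets exactly the cells whose inverse index is ≥ j to the corresponding singleton.
lemma scatter_inv (cs : List Char) (h : Nat) (hh : h = (cs.length + 1) / 2) :
    ∀ (tl : List Char) (j : Nat) (out : List (List Char)), tl = cs.drop j →
    out.length = cs.length → ∀ k,
    ((PySem.List.enumerate tl (j : Int)).foldl (scatterStep (h : Int)) out)[k]? =
      if k < cs.length ∧ j ≤ invIdx h k then some [cs.getD (invIdx h k) ' '] else out[k]? := by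
  intro tl
  induction tl with
  | nil =>
    intro j out htl hlen k
    have hj : cs.length ≤ j := by
      have hl2 := congrArg List.length htl; simp at hl2; omega
    rw [if_neg]
    · simp [PySem.List.enumerate]
    · rintro ⟨hk, hjk⟩
      exact absurd (invIdx_lt cs.length h k hh hk) (by omega)
  | cons c tl' ih =>
    intro j out htl hlen k
    have hjn : j < cs.length := by
      by_contra hc
      rw [List.drop_eq_nil_of_le (by omega)] at htl
      exact List.cons_ne_nil c tl' htl
    have hdrop : cs.drop j = cs[j] :: cs.drop (j + 1) := List.drop_eq_getElem_cons hjn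
    have hcons := htl.trans hdrop
    injection hcons with hc htl'
    rw [PySem.List.enumerate_cons, List.foldl_cons]
    have hstep : scatterStep (h : Int) out ((j : Int), c) = out.set (posIdx h j) [c] := by
      unfold scatterStep; rw [pos_cast]
    rw [hstep]
    have hcast : ((j : Int) + 1) = ((j + 1 : Nat) : Int) := by push_cast; ring
    rw [hcast, ih (j + 1) (out.set (posIdx h j) [c]) htl' (by simp [hlen]) k]
    by_cases h1 : k < cs.length ∧ j + 1 ≤ invIdx h k
    · rw [if_pos h1, if_pos ⟨h1.1, by omega⟩]
    · rw [if_neg h1]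
      by_cases h2 : k = posIdx h j
      · subst h2
        have hkn : posIdx h j < cs.length := posIdx_lt cs.length h j hh hjn
        have hinv : invIdx h (posIdx h j) = j := invIdx_posIdx cs.length h j hh hjn
        rw [if_pos ⟨hkn, by omega⟩, List.getElem?_set_eq_of_lt _ (by omega)]
        rw [hc, hinv]
        have : cs.getD j ' ' = cs[j] := by
          simp [List.getD, List.getElem?_eq_getElem hjn]
        rw [this]
      · rw [List.getElem?_set_ne (by omega)]
        rw [if_neg]
        rintro ⟨hk, hjk⟩
        have : invIdx h k = j := by omega
        exact h2 ((posIdx_invIdx cs.length h k hh hk).symm.trans (by rw [this]))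

-- flatMap of the pairing function doubles the length.
lemma inter_len (l : List (Char × Char)) :
    (l.flatMap fun p => [p.1, p.2]).length = 2 * l.length := by
  induction l with
  | nil => simp
  | cons a t ih => simp [List.flatMap_cons, ih]; omega

-- Pointwise characterisation of the interleaving of two lists (b at most as long as a).
lemma inter_get (b : List Char) : ∀ (a : List Char), b.length ≤ a.length →
    ∀ k, k < 2 * b.length →
    ((a.zip b).flatMap fun p => [p.1, p.2])[k]? =
      if k % 2 = 0 then a[k / 2]? else b[k / 2]? := by
  induction b with
  | nil => intro a _ k hk; simp at hk
  | cons y b' ih =>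
    intro a hba k hk
    match a with
    | [] => simp at hba
    | x :: a' =>
      rw [List.zip_cons_cons, List.flatMap_cons]
      match k with
      | 0 => simp
      | 1 => simp
      | (k + 2) =>
        have : ([x, y] ++ (a'.zip b').flatMap fun p => [p.1, p.2])[k + 2]?
             = ((a'.zip b').flatMap fun p => [p.1, p.2])[k]? := by
          simp
        rw [this, ih a' (by simp at hba ⊢; omega) k (by simp at hk; omega)]
        have hm : (k + 2) % 2 = k % 2 := by omega
        have hd : (k + 2) / 2 = k / 2 + 1 := by omega
        rw [hm, hd]
        by_cases hp : k % 2 = 0 <;> simp [hp]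

lemma zipI_length (cs : List Char) : (zipI cs).length = cs.length := by
  unfold zipI
  rw [List.length_append, inter_len, List.length_zip]
  simp only [List.length_take, List.length_drop]
  split_ifs <;> simp <;> omega

lemma zipI_getElem? (cs : List Char) (k : Nat) (hk : k < cs.length) :
    (zipI cs)[k]? = some (cs.getD (invIdx ((cs.length + 1) / 2) k) ' ') := by
  unfold zipI
  set n := cs.length with hn
  set h := (n + 1) / 2 with hh
  have hta : (cs.take h).length = h := by simp; omega
  have htb : (cs.drop h).length = n - h := by simp [hn]
  have hzl : ((cs.take h).zip (cs.drop h)).length = n - h := by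
    rw [List.length_zip, hta, htb]; omega
  have hpl : (((cs.take h).zip (cs.drop h)).flatMap fun p => [p.1, p.2]).length = 2 * (n - h) := by
    rw [inter_len, hzl]
  by_cases hlt : k < 2 * (n - h)
  · rw [List.getElem?_append_left (by rw [hpl]; omega)]
    rw [inter_get (cs.drop h) (cs.take h) (by rw [hta, htb]; omega) k (by rw [htb]; omega)]
    unfold invIdx
    by_cases hp : k % 2 = 0
    · rw [if_pos hp, if_pos hp]
      have hk2 : k / 2 < h := by omega
      rw [List.getElem?_take_of_lt hk2, List.getElem?_eq_getElem (by omega : k / 2 < n),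
          List.getD, List.getElem?_eq_getElem (by omega : k / 2 < cs.length)]
      simp
    · rw [if_neg hp, if_neg hp]
      rw [List.getElem?_drop, List.getElem?_eq_getElem (by omega : h + k / 2 < cs.length),
          List.getD, List.getElem?_eq_getElem (by omega : h + k / 2 < cs.length)]
      simp
  · -- only reachable when n is odd and k = n - 1 = 2 * (n - h)
    have hodd : n % 2 = 1 := by omega
    have hke : k = 2 * (n - h) := by omega
    rw [List.getElem?_append_right (by omega)]
    rw [if_pos (by omega : n % 2 ≠ 0)]
    rw [hpl, hke]
    simp only [Nat.sub_self]
    unfold invIdx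
    rw [if_pos (by omega : 2 * (n - h) % 2 = 0)]
    have : 2 * (n - h) / 2 = n - h := by omega
    rw [this]
    simp

-- A's loop: once i has reached n, the body never changes the state again.
lemma untransposeStep_stuck (cs : List Char) (n : Int) (st : List Char × Int × Int)
    (h : ¬ st.2.2 < n) : untransposeStep cs n st = st := by
  obtain ⟨out, j, i⟩ := st
  simp only [untransposeStep]
  split_ifs with h1 h2
  · exact absurd h2.2 h
  · rfl
  · rfl

lemma foldl_step_stuck (cs : List Char) (n : Int) (l : List Int)
    (st : List Char × Int × Int) (h : ¬ st.2.2 < n) :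
    l.foldl (fun st _ => untransposeStep cs n st) st = st := by
  induction l with
  | nil => rfl
  | cons a t ih => simpa [List.foldl_cons, untransposeStep_stuck cs n st h] using ih

-- A's loop invariant: starting at (out, j, h + j) with enough fuel, the loop appends exactly the
-- interleaving of the two halves from position j on, and ends with j = L - h, i = L.
lemma A_loop (cs : List Char) (L h : Nat) (hL : L = cs.length) (hh : h = (L + 1) / 2)
    (l : List Int) (j : Nat) (out : List Char)
    (hj : j ≤ L - h) (hl : L - h - j ≤ l.length) :
    l.foldl (fun st _ => untransposeStep cs (L : Int) st) (out, (j : Int), ((h + j : Nat) : Int))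
      = (out ++ (((cs.take h).drop j).zip ((cs.drop h).drop j)).flatMap (fun p => [p.1, p.2]),
         ((L - h : Nat) : Int), (L : Int)) := by
  induction l generalizing j out with
  | nil =>
    have hje : j = L - h := by simp at hl; omega
    subst hje
    have hz : (cs.drop h).drop (L - h) = [] := by
      apply List.drop_eq_nil_of_le; simp; omega
    rw [hz, List.zip_nil_right]
    simp
    exact_mod_cast (by omega : h + (L - h) = L)
  | cons a t ih =>
    by_cases hcase : j < L - h
    · -- one pair line[j], line[i] is appended
      have hjL : j < cs.length := by omega
      have hiL : h + j < cs.length := by omega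
      rw [List.foldl_cons]
      have hstep : untransposeStep cs (L : Int) (out, (j : Int), ((h + j : Nat) : Int))
          = (out ++ [cs[j], cs[h + j]], ((j : Int) + 1), (((h + j : Nat) : Int) + 1)) := by
        simp only [untransposeStep]
        rw [if_pos ⟨by positivity, by exact_mod_cast (by omega : j < h + j)⟩,
            if_pos ⟨le_refl _, by rw [hL]; exact_mod_cast hiL⟩]
        have e1 : PySem.List.pyGet? cs (j : Int) = some cs[j] := by
          rw [PySem.List.pyGet?_natCast]; exact List.getElem?_eq_getElem hjL
        have e2 : PySem.List.pyGet? cs ((h + j : Nat) : Int) = some cs[h + j] := by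
          rw [PySem.List.pyGet?_natCast]; exact List.getElem?_eq_getElem hiL
        rw [e1, e2]
        rfl
      rw [hstep]
      have hc1 : ((j : Int) + 1) = ((j + 1 : Nat) : Int) := by push_cast; ring
      have hc2 : (((h + j : Nat) : Int) + 1) = ((h + (j + 1) : Nat) : Int) := by push_cast; ring
      rw [hc1, hc2, ih (j + 1) (out ++ [cs[j], cs[h + j]]) (by omega) (by simp at hl ⊢; omega)]
      have hfirst : (cs.take h).drop j = cs[j] :: (cs.take h).drop (j + 1) := by
        rw [List.drop_eq_getElem_cons (by simp; omega)]
        congr 1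
        simp [List.getElem_take]
      have hsecond : (cs.drop h).drop j = cs[h + j] :: (cs.drop h).drop (j + 1) := by
        rw [List.drop_eq_getElem_cons (by simp; omega)]
        congr 1
        simp [List.getElem_drop]
      rw [hfirst, hsecond]
      simp
    · -- j = L - h: i = L, the loop is stuck, nothing more is appended
      have hje : j = L - h := by omega
      have hin : ((h + j : Nat) : Int) = (L : Int) := by push_cast; omega
      have hz : (cs.drop h).drop j = [] := by
        apply List.drop_eq_nil_of_le; simp; omega
      subst hje
      rw [hin, foldl_step_stuck cs (L : Int) _ _ (by simp)]
      rw [hz, List.zip_nil_right]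
      simp

-- A computes zipI.
lemma A_eq (line : String) : untranspose line = String.mk (zipI line.toList) := by
  unfold untranspose
  generalize line.toList = cs
  dsimp only
  have hi0 : -(PySem.Int.floordiv (-(cs.length : Int)) 2) = (((cs.length + 1) / 2 : Nat) : Int) := by
    rw [PySem.Int.neg_floordiv_neg_eq_iff_of_pos (by norm_num)]
    constructor <;> push_cast <;> omega
  have h0 : (0 : Int) = ((0 : Nat) : Int) := rfl
  have hh0 : (((cs.length + 1) / 2 : Nat) : Int) = (((cs.length + 1) / 2 + 0 : Nat) : Int) := by norm_num
  rw [hi0, h0, hh0,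
      A_loop cs cs.length ((cs.length + 1) / 2) rfl rfl _ 0 [] (by omega)
        (by rw [PySem.List.length_pyRange_one]; omega)]
  simp only [List.drop_zero, List.nil_append, Nat.cast_zero]
  unfold zipI
  by_cases hodd : cs.length % 2 ≠ 0
  · have hmod : PySem.Int.mod (cs.length : Int) 2 ≠ 0 := by
      simp only [ne_eq, PySem.Int.mod_eq_zero_iff_dvd]
      omega
    rw [if_pos hmod, if_pos hodd]
    rw [PySem.List.pyGet?_natCast]
    simp [List.getD]
  · have hmod : ¬ PySem.Int.mod (cs.length : Int) 2 ≠ 0 := by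
      simp only [ne_eq, PySem.Int.mod_eq_zero_iff_dvd, not_not] at hodd ⊢
      omega
    rw [if_neg hmod, if_neg hodd]
    simp

-- B computes zipI.
lemma B_eq (line : String) : untranspose_alt line = String.mk (zipI line.toList) := by
  unfold untranspose_alt
  generalize line.toList = cs
  dsimp only
  have hh : PySem.Int.floordiv ((cs.length : Int) + 1) 2 = (((cs.length + 1) / 2 : Nat) : Int) := by
    have hc : ((cs.length : Int) + 1) = ((cs.length + 1 : Nat) : Int) := by push_cast; ring
    rw [hc]
    exact_mod_cast PySem.Int.floordiv_natCast (cs.length + 1) 2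
  rw [hh]
  have hfold : ((PySem.List.enumerate cs 0).foldl
        (scatterStep (((cs.length + 1) / 2 : Nat) : Int)) (List.replicate cs.length []))
      = (zipI cs).map (fun c => [c]) := by
    apply List.ext_getElem?
    intro k
    have key := scatter_inv cs ((cs.length + 1) / 2) rfl cs 0 (List.replicate cs.length [])
      List.drop_zero.symm (by simp) k
    simp only [Nat.cast_zero] at key
    rw [key]
    by_cases hk : k < cs.length
    · rw [if_pos ⟨hk, Nat.zero_le _⟩, List.getElem?_map, zipI_getElem? cs k hk]
      rfl
    · rw [if_neg (by tauto), List.getElem?_eq_none (by simp; omega),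
          List.getElem?_eq_none (by simp [zipI_length]; omega)]
  rw [hfold]
  congr 1
  induction (zipI cs) with
  | nil => rfl
  | cons c t ih => simp_all

-- ===== VERDICT (by name: the statement is the Claim_ definition above) =====
theorem untranspose_spec : Claim_equal_untranspose := by
  intro line _
  unfold Spec_untranspose
  rw [A_eq, B_eq]
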